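-- pv_equiv track=rewrite | github.com/mtuoc/MTUOC-server | MTUOC_tags.py | insert_before
-- ===== SOURCE A (Python) =====
-- def insert_before(segment,insertposition,opentag):
--     position=0
--     num=-1
--     for token in segment:
--         if token.find("▂")>-1:
--             parts=token.split("▂")
--             try:
--                 num=int(parts[-1])
--             except:
--                 num=-1
--         if num==insertposition:
--             segment.insert(position,opentag)
--             break
--         position+=1
--     return(segment)
-- ===== SOURCE B (Python) =====
-- def insert_before(segment, insertposition, opentag):
--     # Staged decomposition: (1) parse each token independently into an optional
--     # numeric suffix, (2) forward-fill the Nones with the last seen value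
--     # (initially -1), (3) one lookup + the same in-place insert as the original.
--     raw = [_suffix(token) for token in segment]
--     num = -1
--     nums = []
--     for r in raw:
--         if r is not None:
--             num = r
--         nums.append(num)
--     if insertposition in nums:
--         segment.insert(nums.index(insertposition), opentag)
--     return segment
--
--
-- def _suffix(token):
--     # optional numeric suffix of one token; parse failure mirrors A's except -> -1
--     if "▂" not in token:
--         return None
--     try:
--         return int(token.split("▂")[-1])
--     except ValueError:
--         return -1
-- ===== Notes on version B (the rewrite author's own statement) =====
-- stated objective: alternative
-- what changed: A's single stateful scan that breaks and inserts mid-loop is replaced by three staged passes: a stateless per-token parse into optional suffixes, a forward-fill pass over those options, and a membership test plus nums.index to locate the insertion point.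
import Mathlib
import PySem

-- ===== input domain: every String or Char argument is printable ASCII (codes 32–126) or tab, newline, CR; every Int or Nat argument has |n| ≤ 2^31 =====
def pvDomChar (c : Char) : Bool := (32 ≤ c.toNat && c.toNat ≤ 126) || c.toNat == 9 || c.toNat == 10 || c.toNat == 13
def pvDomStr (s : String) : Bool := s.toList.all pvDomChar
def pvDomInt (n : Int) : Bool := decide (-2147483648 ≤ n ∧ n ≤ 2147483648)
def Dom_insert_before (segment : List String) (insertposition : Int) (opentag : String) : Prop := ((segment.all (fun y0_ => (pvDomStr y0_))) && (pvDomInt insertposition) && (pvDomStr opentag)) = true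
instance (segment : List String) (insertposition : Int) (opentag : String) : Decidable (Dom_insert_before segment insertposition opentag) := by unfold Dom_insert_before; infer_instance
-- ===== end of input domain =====

-- B replaces A's single stateful scan-with-break by three staged passes (stateless parse, forward fill, index lookup): alternative decomposition, same cost.
-- NOTE: the Python A mutates `segment` in place (list.insert); B performs the same mutation; the equivalence proved here is about the return value.

-- ===== PORT A =====
-- A's loop: state (position, num); on each token update num from the part after the
-- last '▂' (int() failure → -1), break and insert when num == insertposition.
def insertBeforeGoA (orig : List String) (rest : List String) (pos : Nat)
    (num : Int) (ip : Int) (tag : String) : List String :=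
  match rest with
  | [] => orig
  | t :: ts =>
    -- if token.find("▂")>-1: num = int(token.split("▂")[-1]) / except: num = -1
    let num' :=
      if PySem.Str.find t "▂" > -1 then
        (((PySem.Str.split? t "▂").getD [] |> (PySem.List.pyGet? · (-1))).bind PySem.Int.ofStr?).getD (-1)
      else num
    if num' = ip then PySem.List.insert orig (pos : Int) tag
    else insertBeforeGoA orig ts (pos + 1) num' ip tag

def insert_before (segment : List String) (insertposition : Int) (opentag : String) : List String :=
  insertBeforeGoA segment segment 0 (-1) insertposition opentag

-- ===== PORT B =====
-- _suffix(token): the optional numeric suffix of one token (stateless)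
def pvSuffix (token : String) : Option Int :=
  if PySem.Str.isIn "▂" token = false then none
  else some ((((PySem.Str.split? token "▂").getD []
        |> (PySem.List.pyGet? · (-1))).bind PySem.Int.ofStr?).getD (-1))

-- second pass: forward-fill the Nones with the last seen value (initially -1)
def pvFill : List (Option Int) → Int → List Int
  | [], _ => []
  | r :: rs, num =>
    let n := r.getD num
    n :: pvFill rs n

def insert_before_alt (segment : List String) (insertposition : Int) (opentag : String) : List String :=
  let raw := segment.map pvSuffix
  let nums := pvFill raw (-1)
  -- if insertposition in nums: segment.insert(nums.index(insertposition), opentag)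
  match PySem.List.index? nums insertposition with
  | some i => PySem.List.insert segment (i : Int) opentag
  | none => segment

-- ===== PRECONDITION & SPEC =====
def Spec_insert_before (segment : List String) (insertposition : Int) (opentag : String) (out : List String) : Prop := out = insert_before_alt segment insertposition opentag
instance (segment : List String) (insertposition : Int) (opentag : String) (out : List String) : Decidable (Spec_insert_before segment insertposition opentag out) := by unfold Spec_insert_before; infer_instance

-- ===== CLAIM =====
def Claim_equal_insert_before : Prop := ∀ (segment : List String) (insertposition : Int) (opentag : String), Dom_insert_before segment insertposition opentag → Spec_insert_before segment insertposition opentag (insert_before segment insertposition opentag)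

-- ===== LEMMAS AND PROOFS =====

-- token.find("▂") > -1 in A and "▂" in token in B decide the same condition
theorem find_gt_iff_isIn (t : String) :
    (PySem.Str.find t "▂" > -1) ↔ PySem.Str.isIn "▂" t = true := by
  have h1 := PySem.Chars.neg_one_le_find t.toList "▂".toList
  have h2 := PySem.Chars.find_ne_neg_one_iff t.toList "▂".toList
  have h3 := PySem.Chars.isIn_iff_infix ("▂".toList) (t.toList)
  simp only [PySem.Str.find_eq, PySem.Str.isIn_eq]
  constructor
  · intro h; exact h3.mpr (h2.mp (by omega))
  · intro h; have := h2.mpr (h3.mp h); omega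

-- A's per-token state update equals B's (pvSuffix token).getD num
theorem stepA_eq_suffix (t : String) (num : Int) :
    (if PySem.Str.find t "▂" > -1 then
      (((PySem.Str.split? t "▂").getD [] |> (PySem.List.pyGet? · (-1))).bind PySem.Int.ofStr?).getD (-1)
    else num) = (pvSuffix t).getD num := by
  unfold pvSuffix
  by_cases h : PySem.Str.isIn "▂" t = true
  · rw [if_pos ((find_gt_iff_isIn t).mpr h), if_neg (by intro hf; rw [h] at hf; cases hf), Option.getD_some]
  · rw [if_neg (fun hc => h ((find_gt_iff_isIn t).mp hc)),
        if_pos (Bool.eq_false_iff.mpr h), Option.getD_none]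

-- A's scan over ts with state (pos, num) returns the lookup into B's filled table
theorem goA_eq_lookup (orig : List String) (ip : Int) (tag : String) :
    ∀ (ts : List String) (pos : Nat) (num : Int),
      insertBeforeGoA orig ts pos num ip tag =
        (match PySem.List.index? (pvFill (ts.map pvSuffix) num) ip with
         | some i => PySem.List.insert orig ((pos + i : Nat) : Int) tag
         | none => orig) := by
  intro ts
  induction ts with
  | nil => intro pos num; simp [insertBeforeGoA, pvFill, PySem.List.index?]
  | cons t ts ih =>
    intro pos num
    rw [insertBeforeGoA, List.map_cons, pvFill, stepA_eq_suffix]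
    set num' := (pvSuffix t).getD num with hnum'
    by_cases hip : num' = ip
    · subst hip
      rw [if_pos rfl, PySem.List.index?_cons_self]
      simp
    · rw [if_neg hip, ih (pos + 1) num',
          PySem.List.index?_cons_of_ne (xs := pvFill (ts.map pvSuffix) num') hip]
      cases PySem.List.index? (pvFill (ts.map pvSuffix) num') ip with
      | none => simp
      | some i =>
        simp only [Option.map_some]
        have : pos + 1 + i = pos + (i + 1) := by omega
        rw [this]

-- ===== VERDICT =====
theorem insert_before_spec : Claim_equal_insert_before := by
  intro segment insertposition opentag _
  unfold Spec_insert_before insert_before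
  rw [goA_eq_lookup]
  simp only [insert_before_alt]
  cases h : PySem.List.index? (pvFill (segment.map pvSuffix) (-1)) insertposition with
  | none => rfl
  | some i => simp
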